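-- pv_equiv track=rewrite | github.com/rishideepc/ExplainabilityInLLMs-MScThesis | evaluation/run_semantic_arg_eval.py | deduce_yhat
-- ===== SOURCE A (Python) =====
-- from typing import Any, Dict, Iterable, List, Optional, Tuple, Union
--
-- def deduce_yhat(args: List[str],
--                 attacks: List[Tuple[str, str]],
--                 supports: List[Tuple[str, str]],
--                 strategy: str = "auto") -> Optional[str]:
--     """
--     Infers root node from graph structure
--
--     @params: argument IDs, attack edges, support edges (s,b), strategy('auto'|'db0'|'root')
--
--     @returns: selected root ID or None
--     """
--     if not args:
--         return None
--     if strategy not in {"db0", "root", "auto"}: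
--         strategy = "auto"
--     if strategy in {"db0", "auto"} and "db0" in args:
--         return "db0"
--     indeg = {a: 0 for a in args}
--     for a, b in attacks:
--         if b in indeg: indeg[b] += 1
--     for s, b in supports:
--         if b in indeg: indeg[b] += 1
--     return max(indeg, key=lambda k: indeg[k]) if indeg else args[0]
-- ===== SOURCE B (Python) =====
-- from typing import List, Optional, Tuple
--
-- def deduce_yhat(args: List[str],
--                 attacks: List[Tuple[str, str]],
--                 supports: List[Tuple[str, str]],
--                 strategy: str = "auto") -> Optional[str]:
--     if not args:
--         return None
--     # any strategy other than "root" is normalized to one that allows the db0 shortcut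
--     if strategy != "root" and "db0" in args:
--         return "db0"
--
--     def indeg(a: str) -> int:
--         return sum(1 for _, b in attacks if b == a) + sum(1 for _, b in supports if b == a)
--
--     return max(args, key=indeg)
-- ===== Notes on version B (the rewrite author's own statement) =====
-- stated objective: simpler
-- what changed: Replaced the prebuilt in-degree dict (two edge passes filling a table, then max over its keys) with a per-argument counting helper that rescans both edge lists, selected by max(args, key=indeg); the strategy normalization collapses to a single 'strategy != "root"' test.
import Mathlib
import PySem

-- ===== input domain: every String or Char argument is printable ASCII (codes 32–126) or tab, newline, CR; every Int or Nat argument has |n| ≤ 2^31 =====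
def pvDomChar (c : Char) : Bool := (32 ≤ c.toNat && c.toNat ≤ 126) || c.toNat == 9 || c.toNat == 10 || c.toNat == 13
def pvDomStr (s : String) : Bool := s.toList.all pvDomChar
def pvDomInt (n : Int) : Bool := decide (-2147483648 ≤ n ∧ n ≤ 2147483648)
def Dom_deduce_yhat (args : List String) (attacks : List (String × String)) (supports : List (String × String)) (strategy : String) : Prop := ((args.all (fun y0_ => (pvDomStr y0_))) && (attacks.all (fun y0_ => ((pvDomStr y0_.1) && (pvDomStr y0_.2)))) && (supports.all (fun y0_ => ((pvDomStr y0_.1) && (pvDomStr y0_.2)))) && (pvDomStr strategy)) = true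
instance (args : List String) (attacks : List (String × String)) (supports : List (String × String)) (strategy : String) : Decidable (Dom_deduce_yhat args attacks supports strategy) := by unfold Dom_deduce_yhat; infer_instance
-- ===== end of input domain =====

-- B replaces A's prebuilt in-degree dict with a per-argument edge-scan counter selected by max(args, key=…); simpler decomposition, not faster.

-- ===== PORT A =====
def deduce_yhat (args : List String) (attacks : List (String × String)) (supports : List (String × String)) (strategy : String) : Option String :=
  if args = [] then none
  else
    -- if strategy not in {"db0","root","auto"}: strategy = "auto"
    let strategy := if strategy = "db0" ∨ strategy = "root" ∨ strategy = "auto" then strategy else "auto"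
    if (strategy = "db0" ∨ strategy = "auto") ∧ "db0" ∈ args then some "db0"
    else
      -- indeg = {a: 0 for a in args}
      let indeg : PySem.Dict String Int := args.foldl (fun d a => d.insert a 0) PySem.Dict.empty
      -- for a, b in attacks: if b in indeg: indeg[b] += 1
      let indeg := attacks.foldl (fun d p => if d.contains p.2 then d.modify p.2 0 (· + 1) else d) indeg
      -- for s, b in supports: if b in indeg: indeg[b] += 1
      let indeg := supports.foldl (fun d p => if d.contains p.2 then d.modify p.2 0 (· + 1) else d) indeg
      -- return max(indeg, key=lambda k: indeg[k]) if indeg else args[0]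
      -- (indeg[k] for k iterated over indeg's keys is exactly getD k 0; args[0] via pyGet?, exact)
      if indeg.size ≠ 0 then PySem.List.max? indeg.keys (fun k => indeg.getD k 0)
      else PySem.List.pyGet? args 0

-- ===== PORT B =====
-- def indeg(a): return sum(1 for _, b in attacks if b == a) + sum(1 for _, b in supports if b == a)
def pvIndeg (attacks : List (String × String)) (supports : List (String × String)) (a : String) : Int :=
  ((attacks.filter (fun p => p.2 = a)).map (fun _ => (1 : Int))).sum
  + ((supports.filter (fun p => p.2 = a)).map (fun _ => (1 : Int))).sum

def deduce_yhat_alt (args : List String) (attacks : List (String × String)) (supports : List (String × String)) (strategy : String) : Option String :=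
  if args = [] then none
  else if strategy ≠ "root" ∧ "db0" ∈ args then some "db0"
  else PySem.List.max? args (pvIndeg attacks supports)

-- ===== PRECONDITION & SPEC =====
def Spec_deduce_yhat (args : List String) (attacks : List (String × String)) (supports : List (String × String)) (strategy : String) (out : Option String) : Prop := out = deduce_yhat_alt args attacks supports strategy
instance (args : List String) (attacks : List (String × String)) (supports : List (String × String)) (strategy : String) (out : Option String) : Decidable (Spec_deduce_yhat args attacks supports strategy out) := by unfold Spec_deduce_yhat; infer_instance

-- ===== CLAIM (what is proved, stated in full; the proofs are below) =====
def Claim_equal_deduce_yhat : Prop := ∀ (args : List String) (attacks : List (String × String)) (supports : List (String × String)) (strategy : String), Dom_deduce_yhat args attacks supports strategy → Spec_deduce_yhat args attacks supports strategy (deduce_yhat args attacks supports strategy)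

-- ===== LEMMAS AND PROOFS =====

-- the loop body of A's two edge passes
def pvLoopStep (d : PySem.Dict String Int) (p : String × String) : PySem.Dict String Int :=
  if d.contains p.2 then d.modify p.2 0 (· + 1) else d

-- the foldl step of PySem.List.max?
def pvMaxStep (f : String → Int) (acc : Option String) (x : String) : Option String :=
  match acc with
  | none => some x
  | some m => if f m < f x then some x else some m

theorem pvMax?_eq_foldl (xs : List String) (f : String → Int) :
    PySem.List.max? xs f = xs.foldl (pvMaxStep f) none := by
  unfold PySem.List.max?
  congr 1
  funext acc x
  cases acc <;> simp [pvMaxStep]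

-- base dict {a: 0 for a in args}: every key maps to 0
theorem pvBaseGetD (l : List String) (d : PySem.Dict String Int) (v : String) :
    (l.foldl (fun d a => d.insert a 0) d).getD v 0 = if v ∈ l then 0 else d.getD v 0 := by
  induction l generalizing d with
  | nil => simp
  | cons x t ih =>
    simp only [List.foldl_cons, ih, PySem.Dict.getD_insert, List.mem_cons]
    by_cases hv : v ∈ t <;> by_cases hx : v = x <;> simp [hv, hx]

-- the conditional-modify pass never changes the key list
theorem pvLoopKeys (l : List (String × String)) (d : PySem.Dict String Int) :
    (l.foldl pvLoopStep d).keys = d.keys := by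
  induction l generalizing d with
  | nil => rfl
  | cons p t ih =>
    simp only [List.foldl_cons, pvLoopStep]
    by_cases h : d.contains p.2
    · rw [if_pos h, ih, PySem.Dict.keys_modify, PySem.Dict.keys_insert_of_contains _ _ h]
    · rw [if_neg h, ih]

-- the conditional-modify pass adds, at each present key, the number of edges targeting it
theorem pvLoopGetD (l : List (String × String)) (d : PySem.Dict String Int) (a : String)
    (ha : d.contains a = true) :
    (l.foldl pvLoopStep d).getD a 0 = d.getD a 0 + (l.countP (fun p => p.2 = a) : Int) := by
  induction l generalizing d with
  | nil => simp
  | cons p t ih =>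
    simp only [List.foldl_cons, pvLoopStep, List.countP_cons]
    by_cases hc : d.contains p.2
    · rw [if_pos hc]
      have ha' : (d.modify p.2 0 (· + 1)).contains a = true := by
        simp [PySem.Dict.contains_modify, ha]
      rw [ih _ ha']
      by_cases hpa : p.2 = a
      · subst hpa
        rw [PySem.Dict.getD_modify_self]
        simp; ring
      · rw [PySem.Dict.getD_modify_of_ne _ _ _ (Ne.symm hpa)]
        simp [hpa]
    · rw [if_neg hc]
      have hpa : ¬ (p.2 = a) := fun h => by rw [h] at hc; exact hc ha
      rw [ih _ ha]
      simp [hpa]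

-- the running max only depends on the key function's values on the list and the accumulator
theorem pvFoldlMaxCongr (f g : String → Int) (xs : List String) (acc : Option String)
    (hxs : ∀ x ∈ xs, f x = g x) (hacc : ∀ m, acc = some m → f m = g m) :
    xs.foldl (pvMaxStep f) acc = xs.foldl (pvMaxStep g) acc := by
  induction xs generalizing acc with
  | nil => rfl
  | cons x t ih =>
    simp only [List.foldl_cons]
    have hx : f x = g x := hxs x List.mem_cons_self
    have hstep : pvMaxStep f acc x = pvMaxStep g acc x := by
      cases acc with
      | none => rfl
      | some m => simp [pvMaxStep, hx, hacc m rfl]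
    rw [hstep]
    refine ih _ (fun y hy => hxs y (List.mem_cons_of_mem _ hy)) (fun m hm => ?_)
    cases acc with
    | none =>
      simp only [pvMaxStep] at hm
      cases hm; exact hx
    | some m0 =>
      have hm0 : f m0 = g m0 := hacc m0 rfl
      simp only [pvMaxStep] at hm
      split at hm <;> (cases hm; first | exact hx | exact hm0)

-- Set.update only appends: the seen prefix is preserved
theorem pvPrefixUpdate (xs : List String) (s : PySem.Set String) :
    s <+: PySem.Set.update s xs := by
  induction xs generalizing s with
  | nil => exact List.prefix_refl s
  | cons x t ih =>
    refine List.IsPrefix.trans ?_ (ih (PySem.Set.add s x))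
    by_cases h : x ∈ s <;> simp [PySem.Set.add, h]

-- running max over the newly-added part of a first-occurrence dedup equals running max over the list,
-- provided the accumulator already dominates everything seen
theorem pvFoldlMaxDedupAux (f : String → Int) (xs : List String) (s : PySem.Set String)
    (acc : Option String)
    (hdom : ∀ x ∈ s, ∃ m, acc = some m ∧ f x ≤ f m) :
    ((PySem.Set.update s xs).drop s.length).foldl (pvMaxStep f) acc
      = xs.foldl (pvMaxStep f) acc := by
  induction xs generalizing s acc with
  | nil => simp [PySem.Set.update]
  | cons x t ih =>
    have hupd : PySem.Set.update s (x :: t) = PySem.Set.update (PySem.Set.add s x) t := rfl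
    by_cases h : x ∈ s
    · -- x already seen: dedup drops it, and the accumulator absorbs it
      have hadd : PySem.Set.add s x = s := by simp [PySem.Set.add, h]
      obtain ⟨m, hm, hle⟩ := hdom x h
      have hstep : pvMaxStep f acc x = acc := by
        subst hm; simp [pvMaxStep, not_lt.mpr hle]
      rw [hupd, hadd, List.foldl_cons, hstep, ih s acc hdom]
    · -- x is new: it is appended right after s
      have hadd : PySem.Set.add s x = s ++ [x] := by simp [PySem.Set.add, h]
      obtain ⟨rest, hrest⟩ := pvPrefixUpdate t (PySem.Set.add s x)
      have hdrop1 : (PySem.Set.update (PySem.Set.add s x) t).drop s.length = x :: rest := by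
        rw [← hrest, hadd, List.append_assoc]
        simp
      have hdrop2 : (PySem.Set.update (PySem.Set.add s x) t).drop (PySem.Set.add s x).length = rest := by
        rw [← hrest]; exact List.drop_left
      have hdom' : ∀ y ∈ PySem.Set.add s x, ∃ m, pvMaxStep f acc x = some m ∧ f y ≤ f m := by
        intro y hy
        rw [hadd] at hy
        cases acc with
        | none =>
          refine ⟨x, rfl, ?_⟩
          rcases List.mem_append.mp hy with hys | hyx
          · obtain ⟨m, hm, _⟩ := hdom y hys; cases hm
          · simp at hyx; subst hyx; exact le_refl _
        | some m =>
          by_cases hlt : f m < f x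
          · refine ⟨x, by simp [pvMaxStep, hlt], ?_⟩
            rcases List.mem_append.mp hy with hys | hyx
            · obtain ⟨m', hm', hle'⟩ := hdom y hys
              cases hm'; exact le_of_lt (lt_of_le_of_lt hle' hlt)
            · simp at hyx; subst hyx; exact le_refl _
          · refine ⟨m, by simp [pvMaxStep, hlt], ?_⟩
            rcases List.mem_append.mp hy with hys | hyx
            · obtain ⟨m', hm', hle'⟩ := hdom y hys; cases hm'; exact hle'
            · simp at hyx; subst hyx; exact not_lt.mp hlt
      calc ((PySem.Set.update s (x :: t)).drop s.length).foldl (pvMaxStep f) acc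
          = (x :: rest).foldl (pvMaxStep f) acc := by rw [hupd, hdrop1]
        _ = rest.foldl (pvMaxStep f) (pvMaxStep f acc x) := by rw [List.foldl_cons]
        _ = t.foldl (pvMaxStep f) (pvMaxStep f acc x) := by
              rw [← hdrop2]; exact ih (PySem.Set.add s x) _ hdom'
        _ = (x :: t).foldl (pvMaxStep f) acc := (List.foldl_cons ..).symm

-- max with ties-to-first over the first-occurrence dedup equals max over the original list
theorem pvMaxDedup (f : String → Int) (xs : List String) :
    PySem.List.max? (PySem.List.dedup xs) f = PySem.List.max? xs f := by
  rw [pvMax?_eq_foldl, pvMax?_eq_foldl]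
  have h := pvFoldlMaxDedupAux f xs [] none (by intro x hx; cases hx)
  simpa [PySem.List.dedup, PySem.Set.ofList_eq_foldl, PySem.Set.update] using h

-- ===== VERDICT (by name: the statement is the Claim_ definition above) =====
theorem deduce_yhat_spec : Claim_equal_deduce_yhat := by
  intro args attacks supports strategy _
  unfold Spec_deduce_yhat deduce_yhat deduce_yhat_alt
  by_cases hnil : args = []
  · simp [hnil]
  rw [if_neg hnil, if_neg hnil]
  -- the normalized-strategy guard of A is B's (strategy ≠ "root" ∧ "db0" ∈ args)
  have hguard : ((if strategy = "db0" ∨ strategy = "root" ∨ strategy = "auto" then strategy else "auto") = "db0"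
      ∨ (if strategy = "db0" ∨ strategy = "root" ∨ strategy = "auto" then strategy else "auto") = "auto")
      ↔ strategy ≠ "root" := by
    by_cases h0 : strategy = "db0" <;> by_cases h1 : strategy = "root" <;>
      by_cases h2 : strategy = "auto" <;> simp [h0, h1, h2]
  by_cases hb : strategy ≠ "root" ∧ "db0" ∈ args
  · rw [if_pos hb, if_pos ⟨hguard.mpr hb.1, hb.2⟩]
  · rw [if_neg hb, if_neg (fun h => hb ⟨hguard.mp h.1, h.2⟩)]
    -- main branch: the in-degree table
    set base : PySem.Dict String Int := args.foldl (fun d a => d.insert a 0) PySem.Dict.empty with hbase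
    have hkeys0 : base.keys = PySem.List.dedup args := by
      rw [hbase, PySem.Dict.keys_foldl_insert args (fun _ _ => (0 : Int)) PySem.Dict.empty]
      simp [PySem.List.dedup, PySem.Set.ofList_eq_foldl, PySem.Set.update, PySem.Dict.keys_empty]
    set d1 := attacks.foldl pvLoopStep base with hd1
    set d2 := supports.foldl pvLoopStep d1 with hd2
    have hstep : (fun (d : PySem.Dict String Int) (p : String × String) =>
        if d.contains p.2 then d.modify p.2 0 (· + 1) else d) = pvLoopStep := rfl
    rw [hstep]
    have hkeys1 : d1.keys = PySem.List.dedup args := by rw [hd1, pvLoopKeys]; exact hkeys0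
    have hkeys2 : d2.keys = PySem.List.dedup args := by rw [hd2, pvLoopKeys]; exact hkeys1
    -- the dict is nonempty, so A takes the max branch
    have hne : d2.size ≠ 0 := by
      intro h
      have : d2.keys = [] := by
        simp only [PySem.Dict.keys]
        simp only [PySem.Dict.size] at h
        exact List.map_eq_nil_iff.mpr (List.length_eq_zero_iff.mp h)
      rw [hkeys2] at this
      obtain ⟨a, t, rfl⟩ := List.exists_cons_of_ne_nil hnil
      have : a ∈ PySem.List.dedup (a :: t) := (PySem.List.mem_dedup _ _).mpr List.mem_cons_self
      simp_all
    rw [if_pos hne]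
    -- the table's value at each key is B's rescanned in-degree
    have hval : ∀ k ∈ PySem.List.dedup args, d2.getD k 0 = pvIndeg attacks supports k := by
      intro k hk
      have hkargs : k ∈ args := (PySem.List.mem_dedup _ _).mp hk
      have hc1 : base.contains k = true := by
        rw [PySem.Dict.contains_iff_mem_keys, hkeys0]; exact hk
      have hc2 : d1.contains k = true := by
        rw [PySem.Dict.contains_iff_mem_keys, hkeys1]; exact hk
      rw [hd2, pvLoopGetD _ _ _ hc2, hd1, pvLoopGetD _ _ _ hc1]
      have hb0 : base.getD k 0 = 0 := by rw [hbase, pvBaseGetD]; simp [hkargs]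
      rw [hb0, pvIndeg, List.countP_eq_length_filter, List.countP_eq_length_filter]
      simp
    rw [hkeys2, pvMax?_eq_foldl, pvMax?_eq_foldl,
      pvFoldlMaxCongr (fun k => d2.getD k 0) (pvIndeg attacks supports) _ none
        hval (fun m hm => by cases hm),
      ← pvMax?_eq_foldl, ← pvMax?_eq_foldl, pvMaxDedup]
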